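-- pv_equiv track=rewrite | github.com/maxuser74/pyChessdotcom | main.py | extract_pgn_text
-- ===== SOURCE A (Python) =====
-- def extract_pgn_text(text):
--     lines = text.split('\n')
--
--     # Find the index of the line that contains "[Link"
--     link_index = -1
--     for i, line in enumerate(lines):
--         if "[Link" in line:
--             link_index = i
--             break
--
--     if link_index == -1:
--         return "No [Link found in text."
--
--     # Remove all lines up to and including the line with "[Link"
--     # Also check for the subsequent empty line and remove it if present
--     post_link_lines = lines[link_index + 1:]
--     if post_link_lines and post_link_lines[0].strip() == '':
--         post_link_lines = post_link_lines[1:]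
--
--     # Rejoin the remaining text
--     remaining_text = '\n'.join(post_link_lines)
--
--     # Find the position of the substring "1." in the remaining text
--     one_index = remaining_text.find("1.")
--     if one_index == -1:
--         return "Substring '1.' not found in the text after [Link."
--
--     # Return the text starting from "1."
--     return remaining_text[one_index:]
-- ===== SOURCE B (Python) =====
-- def extract_pgn_text(text):
--     p = text.find("[Link")
--     if p == -1:
--         return "No [Link found in text."
--     nl = text.find("\n", p)
--     remaining = "" if nl == -1 else text[nl + 1:]
--     i = remaining.find("1.")
--     if i == -1:
--         return "Substring '1.' not found in the text after [Link."
--     return remaining[i:]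
-- ===== Notes on version B (the rewrite author's own statement) =====
-- stated objective: simpler
-- what changed: B drops A's split-into-lines list, enumerate loop, line-list slicing and rejoin: it locates the link marker and the newline ending its line directly in the raw string with two find calls plus one slice, and omits A's blank-line strip, which provably never changes the returned suffix.
import Mathlib
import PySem

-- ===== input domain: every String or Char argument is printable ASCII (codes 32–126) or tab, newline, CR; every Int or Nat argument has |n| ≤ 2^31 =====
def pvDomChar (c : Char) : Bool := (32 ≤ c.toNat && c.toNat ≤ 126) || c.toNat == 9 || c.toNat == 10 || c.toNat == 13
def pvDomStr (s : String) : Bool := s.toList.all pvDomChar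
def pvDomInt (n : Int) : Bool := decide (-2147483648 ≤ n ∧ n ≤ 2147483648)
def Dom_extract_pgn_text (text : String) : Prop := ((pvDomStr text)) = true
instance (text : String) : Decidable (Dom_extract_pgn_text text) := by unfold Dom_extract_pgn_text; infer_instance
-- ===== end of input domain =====

-- ===== PORT A =====
-- B rewrite: works on the raw string with find/slice instead of splitting into a line list (objective: simpler).
-- A-side helper: the 'for i, line in enumerate(lines): if "[Link" in line: ... break' loop
def pvLinkLoop : Int → List String → Int
  | _, [] => -1
  | i, l :: rest => if PySem.Str.isIn "[Link" l then i else pvLinkLoop (i + 1) rest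

def extract_pgn_text (text : String) : String :=
  let lines := (PySem.Str.split? text "\n").getD []
  let link_index := pvLinkLoop 0 lines
  if link_index = -1 then "No [Link found in text."
  else
    let post_link_lines := PySem.List.slice lines (some (link_index + 1)) none
    let post_link_lines2 :=
      match post_link_lines with
      | p :: rest => if PySem.Str.strip p = "" then rest else p :: rest
      | [] => []
    let remaining_text := PySem.Str.join "\n" post_link_lines2
    let one_index := PySem.Str.find remaining_text "1."
    if one_index = -1 then "Substring '1.' not found in the text after [Link."
    else PySem.Str.slice remaining_text (some one_index) none

-- ===== PORT B =====
def extract_pgn_text_alt (text : String) : String :=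
  let p := PySem.Str.find text "[Link"
  if p = -1 then "No [Link found in text."
  else
    let nl := PySem.Str.findFrom text "\n" p
    let remaining := if nl = -1 then "" else PySem.Str.slice text (some (nl + 1)) none
    let i := PySem.Str.find remaining "1."
    if i = -1 then "Substring '1.' not found in the text after [Link."
    else PySem.Str.slice remaining (some i) none

-- ===== PRECONDITION & SPEC =====
def Spec_extract_pgn_text (text : String) (out : String) : Prop := out = extract_pgn_text_alt text
instance (text : String) (out : String) : Decidable (Spec_extract_pgn_text text out) := by unfold Spec_extract_pgn_text; infer_instance

-- ===== CLAIM (what is proved, stated in full; the proofs are below) =====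
def Claim_equal_extract_pgn_text : Prop := ∀ (text : String), Dom_extract_pgn_text text → Spec_extract_pgn_text text (extract_pgn_text text)

-- ===== LEMMAS AND PROOFS =====

def pvLink : List Char := ['[', 'L', 'i', 'n', 'k']
def pvOne : List Char := ['1', '.']
def pvMsg1 : List Char := "No [Link found in text.".toList
def pvMsg2 : List Char := "Substring '1.' not found in the text after [Link.".toList

-- chars-level mirror of A's line splitter (text.split('\n'))
def pvLsplit (c : Char) : List Char → List (List Char)
  | [] => [[]]
  | a :: rest =>
    if a = c then [] :: pvLsplit c rest
    else
      match pvLsplit c rest with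
      | p :: ps => (a :: p) :: ps
      | [] => [[a]]

-- chars-level mirror of pvLinkLoop
def pvIdx : Int → List (List Char) → Int
  | _, [] => -1
  | i, l :: rest => if PySem.Chars.isIn pvLink l then i else pvIdx (i + 1) rest

-- chars-level mirror of A's tail (blank-line strip, join, find '1.', slice)
def pvBlank : List (List Char) → List (List Char)
  | [] => []
  | p :: rest => if PySem.Chars.strip p = [] then rest else p :: rest

def pvTailA (post : List (List Char)) : List Char :=
  if PySem.Chars.find (PySem.Chars.join ['\n'] (pvBlank post)) pvOne = -1 then pvMsg2
  else
    PySem.List.slice (PySem.Chars.join ['\n'] (pvBlank post))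
      (some (PySem.Chars.find (PySem.Chars.join ['\n'] (pvBlank post)) pvOne)) none

-- chars-level mirror of A
def pvChA (s : List Char) : List Char :=
  if pvIdx 0 (pvLsplit '\n' s) = -1 then pvMsg1
  else pvTailA (PySem.List.slice (pvLsplit '\n' s) (some (pvIdx 0 (pvLsplit '\n' s) + 1)) none)

-- chars-level mirror of B's 'remaining' value
def pvRem (s : List Char) : List Char :=
  if PySem.Chars.findFrom s ['\n'] (PySem.Chars.find s pvLink) = -1 then []
  else PySem.List.slice s (some (PySem.Chars.findFrom s ['\n'] (PySem.Chars.find s pvLink) + 1)) none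

-- chars-level mirror of B
def pvChB (s : List Char) : List Char :=
  if PySem.Chars.find s pvLink = -1 then pvMsg1
  else if PySem.Chars.find (pvRem s) pvOne = -1 then pvMsg2
  else PySem.List.slice (pvRem s) (some (PySem.Chars.find (pvRem s) pvOne)) none

-- ---- generic string/list helpers ----

theorem pvStrEqIff (a b : String) : a = b ↔ a.toList = b.toList := by
  constructor
  · intro h; rw [h]
  · intro h
    have := congrArg String.ofList h
    rwa [String.ofList_toList, String.ofList_toList] at this

theorem pvFindGo (sub : List Char) : ∀ (l : List Char) (k : Nat),
    PySem.Chars.find.go sub l k =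
      if PySem.Chars.find l sub = -1 then -1 else (k : Int) + PySem.Chars.find l sub := by
  intro l
  induction l with
  | nil => intro k; simp [PySem.Chars.find.go, PySem.Chars.find]; split <;> simp
  | cons a t ih =>
    intro k
    rw [show PySem.Chars.find (a :: t) sub = PySem.Chars.find.go sub (a :: t) 0 from rfl]
    rw [PySem.Chars.find.go, PySem.Chars.find.go]
    split
    · simp
    · rw [ih (k+1), ih 1]
      have hb := PySem.Chars.neg_one_le_find t sub
      by_cases hf : PySem.Chars.find t sub = -1
      · simp [hf]
      · rw [if_neg hf, if_neg hf, if_neg (by omega)]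
        push_cast; ring

theorem pvFindCons (a : Char) (l sub : List Char) :
    PySem.Chars.find (a :: l) sub =
      if sub.isPrefixOf (a :: l) then 0
      else if PySem.Chars.find l sub = -1 then -1 else 1 + PySem.Chars.find l sub := by
  rw [show PySem.Chars.find (a :: l) sub = PySem.Chars.find.go sub (a :: l) 0 from rfl]
  rw [PySem.Chars.find.go]
  split
  · rfl
  · rw [pvFindGo]; split <;> simp

theorem pvFindEqOf {s sub : List Char} {n : Nat} (h1 : sub <+: s.drop n)
    (h2 : ∀ i < n, ¬ sub <+: s.drop i) : PySem.Chars.find s sub = (n : Int) := by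
  have hinf : sub <:+: s := by
    rcases h1 with ⟨r, hr⟩
    exact ⟨s.take n, r, by rw [List.append_assoc, hr, List.take_append_drop]⟩
  have hne : PySem.Chars.find s sub ≠ -1 := (PySem.Chars.find_ne_neg_one_iff s sub).mpr hinf
  have hnn : 0 ≤ PySem.Chars.find s sub := (PySem.Chars.find_nonneg_iff s sub).mpr hinf
  obtain ⟨hp, hmin⟩ := PySem.Chars.find_spec hnn
  have h3 : ¬ (PySem.Chars.find s sub).toNat < n := fun hlt => h2 _ hlt hp
  have h4 : ¬ n < (PySem.Chars.find s sub).toNat := fun hlt => hmin n hlt h1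
  omega

theorem pvSingletonInfix (a : Char) (l : List Char) : [a] <:+: l ↔ a ∈ l := by
  constructor
  · intro h; exact h.mem (by simp)
  · intro h
    obtain ⟨s, t, hst⟩ := List.append_of_mem h
    exact ⟨s, t, by simp [hst]⟩

theorem pvPrefixShort {x a b : List Char} (h : x <+: a ++ b) (hl : x.length ≤ a.length) :
    x <+: a := by
  obtain ⟨r, hr⟩ := h
  have hx : x = a.take x.length := by
    have : x = (a ++ b).take x.length := by
      rw [← hr, List.take_append_of_le_length (by simp), List.take_of_length_le le_rfl]
    rwa [List.take_append_of_le_length hl] at this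
  rw [hx]; exact List.take_prefix _ _

theorem pvPrefixMem {x l : List Char} (h : x <+: l) {i : Nat} (hi : i < x.length)
    (hil : i < l.length) : l[i] ∈ x := by
  have h2 := h.getElem hi
  exact h2 ▸ List.getElem_mem hi

theorem pvLsplit_ne_nil (c : Char) (s : List Char) : pvLsplit c s ≠ [] := by
  cases s with
  | nil => simp [pvLsplit]
  | cons a rest =>
    simp only [pvLsplit]
    split
    · simp
    · split <;> simp

theorem pvGoInv (c : Char) : ∀ (fuel : Nat) (l cur : List Char) (acc : List (List Char)),
    l.length < fuel →
    PySem.Chars.splitOn.go [c] fuel l cur acc =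
      acc.reverse ++
        (match pvLsplit c l with
         | p :: ps => (cur.reverse ++ p) :: ps
         | [] => [cur.reverse]) := by
  intro fuel
  induction fuel with
  | zero => intro l cur acc h; omega
  | succ fuel ih =>
    intro l cur acc h
    cases l with
    | nil => simp [PySem.Chars.splitOn.go, pvLsplit]
    | cons a rest =>
      rw [PySem.Chars.splitOn.go]
      have hpre : [c].isPrefixOf (a :: rest) = (c == a) := by simp [List.isPrefixOf]
      by_cases hac : a = c
      · rw [hpre]
        simp only [hac, beq_self_eq_true, if_true]
        rw [ih _ _ _ (by simp at h ⊢; omega)]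
        simp only [pvLsplit]
        cases hre : pvLsplit c rest with
        | nil => exact absurd hre (pvLsplit_ne_nil c rest)
        | cons p ps => simp [hre]
      · rw [hpre, if_neg (by simp [Ne.symm hac])]
        rw [ih _ _ _ (by simp at h ⊢; omega)]
        simp only [pvLsplit, if_neg hac]
        cases hre : pvLsplit c rest with
        | nil => exact absurd hre (pvLsplit_ne_nil c rest)
        | cons p ps => simp [hre]

theorem pvSplitOn_eq_lsplit (c : Char) (s : List Char) :
    PySem.Chars.splitOn s [c] = pvLsplit c s := by
  rw [PySem.Chars.splitOn, pvGoInv c (s.length + 1) s [] [] (by omega)]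
  cases hre : pvLsplit c s with
  | nil => exact absurd hre (pvLsplit_ne_nil c s)
  | cons p ps => simp

theorem pvLsplit_no (c : Char) (s : List Char) (h : c ∉ s) : pvLsplit c s = [s] := by
  induction s with
  | nil => rfl
  | cons a rest ih =>
    simp only [List.mem_cons, not_or] at h
    simp only [pvLsplit, ih h.2]
    rw [if_neg (fun hc => h.1 hc.symm)]

theorem pvLsplit_append (c : Char) (h t : List Char) (hh : c ∉ h) :
    pvLsplit c (h ++ c :: t) = h :: pvLsplit c t := by
  induction h with
  | nil => simp [pvLsplit]
  | cons a h' ih =>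
    simp only [List.mem_cons, not_or] at hh
    simp only [List.cons_append, pvLsplit, ih hh.2]
    rw [if_neg (fun hc => hh.1 hc.symm)]

theorem pvJoin_cons (c : Char) (p : List Char) (ps : List (List Char)) (a : Char) :
    PySem.Chars.join [c] ((a :: p) :: ps) = a :: PySem.Chars.join [c] (p :: ps) := by
  cases ps with
  | nil => simp [PySem.Chars.join_singleton]
  | cons q ps' => rw [PySem.Chars.join_cons_cons, PySem.Chars.join_cons_cons]; simp

theorem pvJoin_lsplit (c : Char) (s : List Char) :
    PySem.Chars.join [c] (pvLsplit c s) = s := by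
  induction s with
  | nil => simp [pvLsplit, PySem.Chars.join_singleton]
  | cons a rest ih =>
    by_cases hac : a = c
    · subst hac
      simp only [pvLsplit]
      cases hre : pvLsplit a rest with
      | nil => exact absurd hre (pvLsplit_ne_nil a rest)
      | cons p ps =>
        rw [hre] at ih
        simp only [if_true]
        rw [PySem.Chars.join_cons_cons]
        simp [ih]
    · simp only [pvLsplit, if_neg hac]
      cases hre : pvLsplit c rest with
      | nil => exact absurd hre (pvLsplit_ne_nil c rest)
      | cons p ps =>
        rw [pvJoin_cons]
        rw [hre] at ih
        simp [ih]

theorem pvDecomp (c : Char) (s : List Char) :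
    c ∉ s ∨ ∃ h t, s = h ++ c :: t ∧ c ∉ h := by
  induction s with
  | nil => left; simp
  | cons a rest ih =>
    by_cases hac : a = c
    · right; exact ⟨[], rest, by simp [hac], by simp⟩
    · rcases ih with h | ⟨h, t, rfl, hh⟩
      · left; simp only [List.mem_cons, not_or]
        exact ⟨fun hc => hac hc.symm, h⟩
      · right
        refine ⟨a :: h, t, by simp, ?_⟩
        simp only [List.mem_cons, not_or]
        exact ⟨fun hc => hac hc.symm, hh⟩

theorem pvIdx_ge : ∀ (ls : List (List Char)) (i : Nat),
    pvIdx (i : Int) ls = -1 ∨ (i : Int) ≤ pvIdx (i : Int) ls := by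
  intro ls
  induction ls with
  | nil => intro i; left; rfl
  | cons l rest ih =>
    intro i
    simp only [pvIdx]
    split
    · right; omega
    · have : ((i : Int) + 1) = ((i + 1 : Nat) : Int) := by push_cast; ring
      rw [this]
      rcases ih (i + 1) with h | h
      · left; exact h
      · right; omega

theorem pvIdx_base (ls : List (List Char)) : ∀ (i : Nat),
    pvIdx (i : Int) ls = if pvIdx 0 ls = -1 then -1 else (i : Int) + pvIdx 0 ls := by
  induction ls with
  | nil => intro i; simp [pvIdx]
  | cons l rest ih =>
    intro i
    have hz : pvIdx (0 : Int) (l :: rest) =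
        if PySem.Chars.isIn pvLink l = true then (0 : Int) else pvIdx 1 rest := rfl
    have hi : pvIdx (i : Int) (l :: rest) =
        if PySem.Chars.isIn pvLink l = true then (i : Int) else pvIdx ((i : Int) + 1) rest := rfl
    rw [hz, hi]
    by_cases hin : PySem.Chars.isIn pvLink l = true
    · simp [hin]
    · simp only [hin]
      have e1 : pvIdx ((i : Int) + 1) rest = pvIdx ((i + 1 : Nat) : Int) rest := by push_cast; ring_nf
      have e2 : pvIdx (1 : Int) rest = pvIdx ((1 : Nat) : Int) rest := by norm_num
      rw [e1, e2, ih (i + 1), ih 1]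
      have h := pvIdx_ge rest 0
      norm_num at h
      rcases h with h | h
      · rw [h]; simp
      · have hne : pvIdx 0 rest ≠ -1 := by omega
        rw [if_neg hne, if_neg hne]
        push_cast
        rw [if_neg (show (1 : Int) + pvIdx 0 rest ≠ -1 from by omega)]
        ring

theorem pvIdx_cons_neg (l : List Char) (rest : List (List Char))
    (hin : ¬ PySem.Chars.isIn pvLink l = true) :
    pvIdx 0 (l :: rest) = if pvIdx 0 rest = -1 then -1 else 1 + pvIdx 0 rest := by
  have hz : pvIdx (0 : Int) (l :: rest) =
      if PySem.Chars.isIn pvLink l = true then (0 : Int) else pvIdx 1 rest := rfl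
  rw [hz, if_neg hin]
  have e2 : pvIdx (1 : Int) rest = pvIdx ((1 : Nat) : Int) rest := by norm_num
  rw [e2, pvIdx_base rest 1]
  norm_num

theorem pvIdx_nil_iff (ls : List (List Char)) :
    pvIdx 0 ls = -1 ↔ ∀ l ∈ ls, ¬ pvLink <:+: l := by
  induction ls with
  | nil => simp [pvIdx]
  | cons l rest ih =>
    by_cases hin : PySem.Chars.isIn pvLink l = true
    · have hz : pvIdx (0 : Int) (l :: rest) = 0 := by
        show (if PySem.Chars.isIn pvLink l = true then (0 : Int) else pvIdx 1 rest) = 0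
        rw [if_pos hin]
      rw [hz]
      simp only [List.mem_cons]
      constructor
      · intro h; omega
      · intro h
        exact absurd ((PySem.Chars.isIn_iff_infix _ _).mp hin) (h l (Or.inl rfl))
    · rw [pvIdx_cons_neg l rest hin]
      have hni : ¬ pvLink <:+: l := fun hc => hin ((PySem.Chars.isIn_iff_infix _ _).mpr hc)
      have hge := pvIdx_ge rest 0
      norm_num at hge
      simp only [List.mem_cons]
      constructor
      · intro hc l' hl'
        rcases hl' with rfl | hl'
        · exact hni
        · have : pvIdx 0 rest = -1 := by
            by_cases hr : pvIdx 0 rest = -1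
            · exact hr
            · rw [if_neg hr] at hc; omega
          exact ih.mp this l' hl'
      · intro hc
        rw [if_pos (ih.mpr (fun l' hl' => hc l' (Or.inr hl')))]

-- whitespace
theorem pvStripNil {p : List Char} (h : PySem.Chars.strip p = []) :
    ∀ c ∈ p, PySem.Chars.isspace c = true := by
  have h2 : ∀ c ∈ PySem.Chars.lstrip p, PySem.Chars.isspace c = true := by
    have hr : List.dropWhile PySem.Chars.isspace (PySem.Chars.lstrip p).reverse = [] := by
      have := congrArg List.reverse h
      simpa [PySem.Chars.strip, PySem.Chars.rstrip] using this
    intro c hc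
    exact List.dropWhile_eq_nil_iff.mp hr c (List.mem_reverse.mpr hc)
  intro c hc
  rw [← List.takeWhile_append_dropWhile (p := PySem.Chars.isspace) (l := p)] at hc
  rcases List.mem_append.mp hc with h | h
  · exact List.mem_takeWhile_imp h
  · exact h2 c h

theorem pvFindSpaces {pre r : List Char} (h : ∀ c ∈ pre, PySem.Chars.isspace c = true) :
    PySem.Chars.find (pre ++ r) pvOne =
      if PySem.Chars.find r pvOne = -1 then -1
      else (pre.length : Int) + PySem.Chars.find r pvOne := by
  induction pre with
  | nil =>
    simp only [List.nil_append, List.length_nil, Nat.cast_zero]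
    split
    · assumption
    · omega
  | cons a pre' ih =>
    have ha : PySem.Chars.isspace a = true := h a (by simp)
    have hne : a ≠ '1' := by
      intro hc; rw [hc] at ha; exact absurd ha (by decide)
    have hnp : pvOne.isPrefixOf (a :: (pre' ++ r)) = false := by
      simp only [pvOne, List.isPrefixOf, Bool.and_eq_false_iff]
      left
      exact beq_false_of_ne (fun hc => hne hc.symm)
    rw [List.cons_append, pvFindCons, hnp, if_neg (by simp)]
    rw [ih (fun c hc => h c (by simp [hc]))]
    have hb := PySem.Chars.neg_one_le_find r pvOne
    by_cases hf : PySem.Chars.find r pvOne = -1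
    · simp [hf]
    · rw [if_neg hf, if_neg (by omega), if_neg hf]
      simp only [List.length_cons]
      push_cast; omega

theorem pvNoOneInSpaces {t : List Char} (h : ∀ c ∈ t, PySem.Chars.isspace c = true) :
    PySem.Chars.find t pvOne = -1 := by
  rw [PySem.Chars.find_eq_neg_one_iff]
  intro hinf
  have h1 : '1' ∈ t := hinf.mem (by simp [pvOne])
  exact absurd (h '1' h1) (by decide)

-- ---- find shifting across the first line ----

theorem pvInfixOfDrop {x t : List Char} {j : Nat} (h : x <+: t.drop j) : x <:+: t := by
  obtain ⟨r, hr⟩ := h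
  exact ⟨t.take j, r, by rw [List.append_assoc, hr, List.take_append_drop]⟩

theorem pvDropHigh (h t : List Char) (m : Nat) :
    (h ++ '\n' :: t).drop (h.length + 1 + m) = t.drop m := by
  rw [show h.length + 1 + m = h.length + (1 + m) by omega]
  rw [List.drop_length_add_append]
  rw [show 1 + m = m + 1 by omega, List.drop_succ_cons]

theorem pvNoEarly {h t : List Char} (hl : ¬ pvLink <:+: h) :
    ∀ i ≤ h.length, ¬ pvLink <+: (h ++ '\n' :: t).drop i := by
  intro i hi hpre
  rw [List.drop_append_of_le_length hi] at hpre
  by_cases hs : pvLink.length ≤ (h.drop i).length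
  · exact hl (pvInfixOfDrop (pvPrefixShort hpre hs))
  · have hj : (h.drop i).length < pvLink.length := by omega
    have hjl : (h.drop i).length < ((h.drop i) ++ '\n' :: t).length := by simp
    have hmem := pvPrefixMem hpre hj hjl
    rw [List.getElem_append_right le_rfl] at hmem
    simp at hmem
    exact absurd hmem (by decide)

theorem pvFindLeft {h r : List Char} (hi : pvLink <:+: h) :
    PySem.Chars.find (h ++ r) pvLink = PySem.Chars.find h pvLink := by
  have hnn : 0 ≤ PySem.Chars.find h pvLink := (PySem.Chars.find_nonneg_iff h pvLink).mpr hi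
  obtain ⟨hp, hmin⟩ := PySem.Chars.find_spec hnn
  set q := (PySem.Chars.find h pvLink).toNat with hq
  have hql : q ≤ h.length := by
    have := PySem.Chars.find_le_length h pvLink
    omega
  have hfit : q + pvLink.length ≤ h.length := by
    have := hp.length_le
    simp [List.length_drop] at this
    omega
  have : PySem.Chars.find (h ++ r) pvLink = (q : Int) := by
    apply pvFindEqOf
    · rw [List.drop_append_of_le_length hql]
      exact hp.trans (List.prefix_append _ _)
    · intro i hiq hpre
      rw [List.drop_append_of_le_length (by omega)] at hpre
      have hshort : pvLink.length ≤ (h.drop i).length := by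
        simp [List.length_drop]; omega
      exact hmin i hiq (pvPrefixShort hpre hshort)
  rw [this, hq, Int.toNat_of_nonneg hnn]

theorem pvFindSkip {h t : List Char} (hl : ¬ pvLink <:+: h) :
    PySem.Chars.find (h ++ '\n' :: t) pvLink =
      if PySem.Chars.find t pvLink = -1 then -1
      else (h.length : Int) + 1 + PySem.Chars.find t pvLink := by
  by_cases hf : PySem.Chars.find t pvLink = -1
  · rw [if_pos hf]
    rw [PySem.Chars.find_eq_neg_one_iff] at hf ⊢
    intro hinf
    obtain ⟨j, hj⟩ := (PySem.Chars.exists_prefix_drop_iff_isIn pvLink (h ++ '\n' :: t)).mpr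
      ((PySem.Chars.isIn_iff_infix _ _).mpr hinf)
    by_cases hjh : j ≤ h.length
    · exact pvNoEarly hl j hjh hj
    · have hdj : (h ++ '\n' :: t).drop j = t.drop (j - (h.length + 1)) := by
        have h1 := pvDropHigh h t (j - (h.length + 1))
        rwa [show h.length + 1 + (j - (h.length + 1)) = j by omega] at h1
      rw [hdj] at hj
      exact hf (pvInfixOfDrop hj)
  · have hb := PySem.Chars.neg_one_le_find t pvLink
    have hnn : 0 ≤ PySem.Chars.find t pvLink := by omega
    obtain ⟨hp, hmin⟩ := PySem.Chars.find_spec hnn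
    have hmain : PySem.Chars.find (h ++ '\n' :: t) pvLink =
        ((h.length + 1 + (PySem.Chars.find t pvLink).toNat : Nat) : Int) := by
      apply pvFindEqOf
      · rw [pvDropHigh]; exact hp
      · intro i hi hpre
        by_cases hih : i ≤ h.length
        · exact pvNoEarly hl i hih hpre
        · have hdj : (h ++ '\n' :: t).drop i = t.drop (i - (h.length + 1)) := by
            have h1 := pvDropHigh h t (i - (h.length + 1))
            rwa [show h.length + 1 + (i - (h.length + 1)) = i by omega] at h1
          rw [hdj] at hpre
          exact hmin _ (by omega) hpre
    rw [hmain, if_neg hf]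
    have := Int.toNat_of_nonneg hnn
    push_cast
    omega

theorem pvFindNl {pre t : List Char} (hh : '\n' ∉ pre) :
    PySem.Chars.find (pre ++ '\n' :: t) ['\n'] = (pre.length : Int) := by
  apply pvFindEqOf
  · rw [List.drop_left]
    exact ⟨t, rfl⟩
  · intro i hi hpre
    rw [List.drop_append_of_le_length (le_of_lt hi)] at hpre
    obtain ⟨r, hr⟩ := hpre
    cases hd : pre.drop i with
    | nil =>
      have := congrArg List.length hd
      simp [List.length_drop] at this
      omega
    | cons x xs =>
      rw [hd, List.cons_append] at hr
      have hx : x = '\n' := by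
        have := congrArg (fun l => l.head?) hr
        simpa using this.symm
      have hmem : x ∈ pre := List.drop_subset i pre (hd ▸ List.mem_cons_self)
      rw [hx] at hmem
      exact hh hmem

-- ---- A's tail equals B's tail ----

theorem pvTail_eq (t : List Char) :
    pvTailA (pvLsplit '\n' t) =
      (if PySem.Chars.find t pvOne = -1 then pvMsg2
       else PySem.List.slice t (some (PySem.Chars.find t pvOne)) none) := by
  cases hre : pvLsplit '\n' t with
  | nil => exact absurd hre (pvLsplit_ne_nil _ t)
  | cons p0 ps =>
    have hj : PySem.Chars.join ['\n'] (p0 :: ps) = t := hre ▸ pvJoin_lsplit '\n' t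
    by_cases hs : PySem.Chars.strip p0 = []
    · cases ps with
      | nil =>
        have ht : t = p0 := by rw [← hj, PySem.Chars.join_singleton]
        have hfind : PySem.Chars.find t pvOne = -1 :=
          pvNoOneInSpaces (fun c hc => pvStripNil hs c (ht ▸ hc))
        rw [if_pos hfind]
        unfold pvTailA
        rw [show pvBlank [p0] = [] from by simp [pvBlank, hs], PySem.Chars.join_nil,
          if_pos (by decide)]
      | cons p1 ps' =>
        have ht : t = p0 ++ '\n' :: PySem.Chars.join ['\n'] (p1 :: ps') := by
          rw [← hj, PySem.Chars.join_cons_cons]; simp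
        have hTA : pvTailA (p0 :: p1 :: ps') =
            (if PySem.Chars.find (PySem.Chars.join ['\n'] (p1 :: ps')) pvOne = -1 then pvMsg2
             else PySem.List.slice (PySem.Chars.join ['\n'] (p1 :: ps'))
               (some (PySem.Chars.find (PySem.Chars.join ['\n'] (p1 :: ps')) pvOne)) none) := by
          unfold pvTailA
          rw [show pvBlank (p0 :: p1 :: ps') = p1 :: ps' from by simp [pvBlank, hs]]
        rw [hTA]
        set rem := PySem.Chars.join ['\n'] (p1 :: ps') with hremdef
        have hsp : ∀ c ∈ p0 ++ ['\n'], PySem.Chars.isspace c = true := by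
          intro c hc
          rcases List.mem_append.mp hc with h | h
          · exact pvStripNil hs c h
          · simp at h; subst h; decide
        have hshift : PySem.Chars.find t pvOne =
            (if PySem.Chars.find rem pvOne = -1 then -1
             else ((p0 ++ ['\n']).length : Int) + PySem.Chars.find rem pvOne) := by
          rw [ht, show p0 ++ '\n' :: rem = (p0 ++ ['\n']) ++ rem from by simp]
          exact pvFindSpaces hsp
        have hb := PySem.Chars.neg_one_le_find rem pvOne
        by_cases hf : PySem.Chars.find rem pvOne = -1
        · rw [if_pos hf, hshift, if_pos hf, if_pos rfl]
        · rw [if_neg hf, hshift, if_neg hf, if_neg (by omega)]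
          have hf0 : 0 ≤ PySem.Chars.find rem pvOne := by omega
          rw [PySem.List.slice_from rem hf0, PySem.List.slice_from t (by omega)]
          rw [ht, show p0 ++ '\n' :: rem = (p0 ++ ['\n']) ++ rem from by simp]
          rw [show (((p0 ++ ['\n']).length : Int) + PySem.Chars.find rem pvOne).toNat
              = (p0 ++ ['\n']).length + (PySem.Chars.find rem pvOne).toNat from by omega]
          rw [List.drop_length_add_append]
    · unfold pvTailA
      rw [show pvBlank (p0 :: ps) = p0 :: ps from by simp [pvBlank, hs], hj]

-- ---- the four line-level steps ----

theorem pvChA_line (h t : List Char) (hh : '\n' ∉ h) (hin : pvLink <:+: h) :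
    pvChA (h ++ '\n' :: t) = pvTailA (pvLsplit '\n' t) := by
  have hsplit : pvLsplit '\n' (h ++ '\n' :: t) = h :: pvLsplit '\n' t :=
    pvLsplit_append '\n' h t hh
  have hIsIn : PySem.Chars.isIn pvLink h = true := (PySem.Chars.isIn_iff_infix _ _).mpr hin
  have hli : pvIdx 0 (pvLsplit '\n' (h ++ '\n' :: t)) = 0 := by
    rw [hsplit]
    show (if PySem.Chars.isIn pvLink h = true then (0 : Int) else pvIdx 1 (pvLsplit '\n' t)) = 0
    rw [if_pos hIsIn]
  unfold pvChA
  rw [hli, if_neg (by norm_num), hsplit]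
  congr 1
  rw [PySem.List.slice_from _ (by norm_num)]
  norm_num

theorem pvChA_skip (h t : List Char) (hh : '\n' ∉ h) (hin : ¬ pvLink <:+: h) :
    pvChA (h ++ '\n' :: t) = pvChA t := by
  have hsplit : pvLsplit '\n' (h ++ '\n' :: t) = h :: pvLsplit '\n' t :=
    pvLsplit_append '\n' h t hh
  have hIsIn : ¬ PySem.Chars.isIn pvLink h = true := by
    rw [PySem.Chars.isIn_iff_infix]; exact hin
  have hcons := pvIdx_cons_neg h (pvLsplit '\n' t) hIsIn
  have hge := pvIdx_ge (pvLsplit '\n' t) 0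
  norm_num at hge
  unfold pvChA
  rw [hsplit, hcons]
  by_cases hlt : pvIdx 0 (pvLsplit '\n' t) = -1
  · rw [if_pos hlt, if_pos rfl, if_pos hlt]
  · rw [if_neg hlt, if_neg (by omega), if_neg hlt]
    congr 1
    rw [PySem.List.slice_from _ (by omega), PySem.List.slice_from _ (by omega)]
    rw [show (1 + pvIdx 0 (pvLsplit '\n' t) + 1).toNat
        = (pvIdx 0 (pvLsplit '\n' t) + 1).toNat + 1 from by omega]
    rw [List.drop_succ_cons]

theorem pvChB_line (h t : List Char) (hh : '\n' ∉ h) (hin : pvLink <:+: h) :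
    pvChB (h ++ '\n' :: t) =
      (if PySem.Chars.find t pvOne = -1 then pvMsg2
       else PySem.List.slice t (some (PySem.Chars.find t pvOne)) none) := by
  have hfind : PySem.Chars.find (h ++ '\n' :: t) pvLink = PySem.Chars.find h pvLink :=
    pvFindLeft hin
  have hq0 : 0 ≤ PySem.Chars.find h pvLink := (PySem.Chars.find_nonneg_iff h pvLink).mpr hin
  have hql : (PySem.Chars.find h pvLink).toNat ≤ h.length := by
    have := PySem.Chars.find_le_length h pvLink; omega
  set q := (PySem.Chars.find h pvLink).toNat with hqdef
  have hcast : PySem.Chars.find h pvLink = (q : Int) := by omega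
  have hdq : (h ++ '\n' :: t).drop q = h.drop q ++ '\n' :: t :=
    List.drop_append_of_le_length hql
  have hnl : PySem.Chars.findFrom (h ++ '\n' :: t) ['\n'] (PySem.Chars.find (h ++ '\n' :: t) pvLink)
      = (h.length : Int) := by
    rw [hfind, hcast, PySem.Chars.findFrom_natCast _ _ q (by simp; omega)]
    rw [hdq, pvFindNl (fun hc => hh (List.drop_subset q h hc))]
    rw [if_neg (show ¬ (((h.drop q).length : Nat) : Int) = -1 from by omega)]
    simp only [List.length_drop]
    omega
  have hrem : pvRem (h ++ '\n' :: t) = t := by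
    unfold pvRem
    rw [hnl, if_neg (by omega), PySem.List.slice_from _ (by omega)]
    have := pvDropHigh h t 0
    rw [show ((h.length : Int) + 1).toNat = h.length + 1 + 0 from by omega, this]
    simp
  unfold pvChB
  rw [hrem, hfind, if_neg (by omega)]

theorem pvChB_skip (h t : List Char) (hh : '\n' ∉ h) (hin : ¬ pvLink <:+: h) :
    pvChB (h ++ '\n' :: t) = pvChB t := by
  have hskip := pvFindSkip hin (t := t)
  by_cases hf : PySem.Chars.find t pvLink = -1
  · unfold pvChB
    rw [hskip, if_pos hf, if_pos rfl, if_pos hf]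
  · have hb := PySem.Chars.neg_one_le_find t pvLink
    have hf0 : 0 ≤ PySem.Chars.find t pvLink := by omega
    have hfl := PySem.Chars.find_le_length t pvLink
    set ft := (PySem.Chars.find t pvLink).toNat with hftdef
    have hcast : PySem.Chars.find t pvLink = (ft : Int) := by omega
    have hfs : PySem.Chars.find (h ++ '\n' :: t) pvLink = ((h.length + 1 + ft : Nat) : Int) := by
      rw [hskip, if_neg hf]; push_cast; omega
    have hds : (h ++ '\n' :: t).drop (h.length + 1 + ft) = t.drop ft := pvDropHigh h t ft
    have hlen : h.length + 1 + ft ≤ (h ++ '\n' :: t).length := by simp; omega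
    set r := PySem.Chars.find (t.drop ft) ['\n'] with hrdef
    have hrb := PySem.Chars.neg_one_le_find (t.drop ft) ['\n']
    have hrl := PySem.Chars.find_le_length (t.drop ft) ['\n']
    have hnl_s : PySem.Chars.findFrom (h ++ '\n' :: t) ['\n'] (PySem.Chars.find (h ++ '\n' :: t) pvLink)
        = (if r = -1 then -1 else ((h.length + 1 + ft : Nat) : Int) + r) := by
      rw [hfs, PySem.Chars.findFrom_natCast _ _ _ hlen, hds, ← hrdef]
    have hnl_t : PySem.Chars.findFrom t ['\n'] (PySem.Chars.find t pvLink)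
        = (if r = -1 then -1 else (ft : Int) + r) := by
      rw [hcast, PySem.Chars.findFrom_natCast _ _ _ (by omega), ← hrdef]
    by_cases hr : r = -1
    · have hrem_s : pvRem (h ++ '\n' :: t) = [] := by
        unfold pvRem; rw [hnl_s, if_pos hr, if_pos rfl]
      have hrem_t : pvRem t = [] := by
        unfold pvRem; rw [hnl_t, if_pos hr, if_pos rfl]
      unfold pvChB
      rw [hrem_s, hrem_t, if_neg (by rw [hfs]; push_cast; omega), if_neg hf]
    · have hr0 : 0 ≤ r := by omega
      have hrem : pvRem (h ++ '\n' :: t) = pvRem t := by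
        unfold pvRem
        rw [hnl_s, hnl_t, if_neg hr, if_neg hr, if_neg (by push_cast; omega),
          if_neg (by omega)]
        rw [PySem.List.slice_from _ (by omega), PySem.List.slice_from _ (by omega)]
        have hd2 := pvDropHigh h t (ft + r.toNat + 1)
        rw [show (((h.length + 1 + ft : Nat) : Int) + r + 1).toNat
            = h.length + 1 + (ft + r.toNat + 1) from by push_cast; omega]
        rw [show ((ft : Int) + r + 1).toNat = ft + r.toNat + 1 from by omega]
        exact hd2
      unfold pvChB
      rw [hrem, if_neg (by rw [hfs]; push_cast; omega), if_neg hf]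

-- ---- main chars-level equivalence ----

theorem pvMain : ∀ (n : Nat) (s : List Char), s.length ≤ n → pvChA s = pvChB s := by
  intro n
  induction n with
  | zero =>
    intro s hs
    have hnil : s = [] := List.eq_nil_of_length_eq_zero (by omega)
    subst hnil
    decide
  | succ n ih =>
    intro s hs
    rcases pvDecomp '\n' s with hno | ⟨h, t, rfl, hh⟩
    · -- no newline in s: lines = [s]
      have hl1 : pvLsplit '\n' s = [s] := pvLsplit_no _ _ hno
      by_cases hin : pvLink <:+: s
      · have hIsIn : PySem.Chars.isIn pvLink s = true := (PySem.Chars.isIn_iff_infix _ _).mpr hin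
        have hli : pvIdx 0 (pvLsplit '\n' s) = 0 := by
          rw [hl1]
          show (if PySem.Chars.isIn pvLink s = true then (0 : Int) else pvIdx 1 []) = 0
          rw [if_pos hIsIn]
        have hp : PySem.Chars.find s pvLink ≠ -1 := (PySem.Chars.find_ne_neg_one_iff s pvLink).mpr hin
        have hpn : 0 ≤ PySem.Chars.find s pvLink := (PySem.Chars.find_nonneg_iff s pvLink).mpr hin
        have hkle : (PySem.Chars.find s pvLink).toNat ≤ s.length := by
          have := PySem.Chars.find_le_length s pvLink; omega
        have hnl : PySem.Chars.findFrom s ['\n'] (PySem.Chars.find s pvLink) = -1 := by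
          rw [show PySem.Chars.find s pvLink = (((PySem.Chars.find s pvLink).toNat : Nat) : Int) from by omega]
          rw [PySem.Chars.findFrom_natCast _ _ _ hkle]
          rw [if_pos ((PySem.Chars.find_eq_neg_one_iff _ _).mpr (fun hinf => by
            rw [pvSingletonInfix] at hinf
            exact hno (List.drop_subset _ s hinf)))]
        have hrem : pvRem s = [] := by unfold pvRem; rw [hnl, if_pos rfl]
        unfold pvChA pvChB
        rw [hli, if_neg (by norm_num), hl1, hrem, if_neg hp,
          if_pos (by decide), PySem.List.slice_from _ (by norm_num)]
        rw [show ((0 : Int) + 1).toNat = 1 from by norm_num]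
        unfold pvTailA
        rw [show pvBlank (List.drop 1 [s]) = [] from by simp [pvBlank], PySem.Chars.join_nil,
          if_pos (by decide)]
      · have hli : pvIdx 0 (pvLsplit '\n' s) = -1 := by
          rw [hl1]
          exact (pvIdx_nil_iff [s]).mpr (by intro l hl; simp at hl; subst hl; exact hin)
        unfold pvChA pvChB
        rw [hli, if_pos rfl, if_pos ((PySem.Chars.find_eq_neg_one_iff _ _).mpr hin)]
    · have hts : t.length ≤ n := by simp at hs; omega
      by_cases hin : pvLink <:+: h
      · rw [pvChA_line h t hh hin, pvChB_line h t hh hin, pvTail_eq]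
      · rw [pvChA_skip h t hh hin, pvChB_skip h t hh hin]
        exact ih t hts

-- ---- bridges from the string ports to the chars mirrors ----

theorem pvLinkLoop_eq (lls : List (List Char)) : ∀ (i : Int),
    pvLinkLoop i (lls.map String.ofList) = pvIdx i lls := by
  induction lls with
  | nil => intro i; rfl
  | cons l rest ih =>
    intro i
    show (if PySem.Str.isIn "[Link" (String.ofList l) = true then i
          else pvLinkLoop (i + 1) (rest.map String.ofList)) =
         (if PySem.Chars.isIn pvLink l = true then i else pvIdx (i + 1) rest)
    simp only [PySem.Str.isIn_eq, String.toList_ofList, pvLink]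
    rw [ih (i + 1)]
    rfl

theorem pvTailBridge (post : List (List Char)) :
    (let post2 :=
        match post.map String.ofList with
        | p :: rest => if PySem.Str.strip p = "" then rest else p :: rest
        | [] => []
      let remaining_text := PySem.Str.join "\n" post2
      let one_index := PySem.Str.find remaining_text "1."
      if one_index = -1 then "Substring '1.' not found in the text after [Link."
      else PySem.Str.slice remaining_text (some one_index) none).toList = pvTailA post := by
  have hpost2 :
      (match post.map String.ofList with
       | p :: rest => if PySem.Str.strip p = "" then rest else p :: rest
       | [] => []) = (pvBlank post).map String.ofList := by
    cases post with
    | nil => rfl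
    | cons p rest =>
      show (if PySem.Str.strip (String.ofList p) = "" then rest.map String.ofList
            else String.ofList p :: rest.map String.ofList) = _
      have hc : (PySem.Str.strip (String.ofList p) = "") ↔ (PySem.Chars.strip p = []) := by
        rw [pvStrEqIff, PySem.Str.toList_strip, String.toList_ofList]
        exact Iff.rfl
      by_cases hs : PySem.Chars.strip p = []
      · rw [if_pos (hc.mpr hs), show pvBlank (p :: rest) = rest from by simp [pvBlank, hs]]
      · rw [if_neg (fun hh => hs (hc.mp hh)),
          show pvBlank (p :: rest) = p :: rest from by simp [pvBlank, hs]]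
        rfl
  dsimp only
  rw [hpost2]
  have hrem : (PySem.Str.join "\n" ((pvBlank post).map String.ofList)).toList
      = PySem.Chars.join ['\n'] (pvBlank post) := by
    rw [PySem.Str.toList_join]
    congr 1
    rw [List.map_map]
    simp [Function.comp_def]
  have hfind : PySem.Str.find (PySem.Str.join "\n" ((pvBlank post).map String.ofList)) "1."
      = PySem.Chars.find (PySem.Chars.join ['\n'] (pvBlank post)) pvOne := by
    rw [PySem.Str.find_eq, hrem]; rfl
  unfold pvTailA
  rw [hfind]
  by_cases hf : PySem.Chars.find (PySem.Chars.join ['\n'] (pvBlank post)) pvOne = -1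
  · rw [if_pos hf, if_pos hf]; rfl
  · rw [if_neg hf, if_neg hf, PySem.Str.toList_slice, PySem.Chars.slice_eq_listSlice, hrem]

theorem pvBridgeA (text : String) : (extract_pgn_text text).toList = pvChA text.toList := by
  have hlines : (PySem.Str.split? text "\n").getD []
      = (pvLsplit '\n' text.toList).map String.ofList := by
    rw [PySem.Str.split?.eq_1, show ("\n" : String).toList = ['\n'] from rfl,
      PySem.Chars.split?.eq_1, if_neg (by decide), pvSplitOn_eq_lsplit]
    rfl
  unfold extract_pgn_text pvChA
  dsimp only
  rw [hlines, pvLinkLoop_eq]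
  by_cases hli : pvIdx 0 (pvLsplit '\n' text.toList) = -1
  · rw [if_pos hli, if_pos hli]; rfl
  · rw [if_neg hli, if_neg hli]
    have hge := pvIdx_ge (pvLsplit '\n' text.toList) 0
    norm_num at hge
    have h0 : (0 : Int) ≤ pvIdx 0 (pvLsplit '\n' text.toList) := by omega
    rw [PySem.List.slice_from _ (by omega), PySem.List.slice_from _ (by omega), ← List.map_drop]
    exact pvTailBridge _

theorem pvBridgeB (text : String) :
    (extract_pgn_text_alt text).toList = pvChB text.toList := by
  have hfind : PySem.Str.find text "[Link" = PySem.Chars.find text.toList pvLink := by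
    rw [PySem.Str.find_eq]; rfl
  have hff : PySem.Str.findFrom text "\n" (PySem.Chars.find text.toList pvLink)
      = PySem.Chars.findFrom text.toList ['\n'] (PySem.Chars.find text.toList pvLink) := by
    rw [PySem.Str.findFrom_eq]; rfl
  have hrem : (if PySem.Str.findFrom text "\n" (PySem.Chars.find text.toList pvLink) = -1 then ""
      else PySem.Str.slice text
        (some (PySem.Str.findFrom text "\n" (PySem.Chars.find text.toList pvLink) + 1)) none).toList
      = pvRem text.toList := by
    unfold pvRem
    rw [hff]
    by_cases hnl : PySem.Chars.findFrom text.toList ['\n'] (PySem.Chars.find text.toList pvLink) = -1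
    · rw [if_pos hnl, if_pos hnl]; rfl
    · rw [if_neg hnl, if_neg hnl, PySem.Str.toList_slice, PySem.Chars.slice_eq_listSlice]
  unfold extract_pgn_text_alt pvChB
  dsimp only
  rw [hfind]
  by_cases hp : PySem.Chars.find text.toList pvLink = -1
  · rw [if_pos hp, if_pos hp]; rfl
  · rw [if_neg hp, if_neg hp]
    have hfind2 : PySem.Str.find
        (if PySem.Str.findFrom text "\n" (PySem.Chars.find text.toList pvLink) = -1 then ""
         else PySem.Str.slice text
           (some (PySem.Str.findFrom text "\n" (PySem.Chars.find text.toList pvLink) + 1)) none) "1."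
        = PySem.Chars.find (pvRem text.toList) pvOne := by
      rw [PySem.Str.find_eq, hrem]; rfl
    rw [hfind2]
    by_cases hi : PySem.Chars.find (pvRem text.toList) pvOne = -1
    · rw [if_pos hi, if_pos hi]; rfl
    · rw [if_neg hi, if_neg hi, PySem.Str.toList_slice, PySem.Chars.slice_eq_listSlice, hrem]

-- ===== VERDICT (by name: the statement is the Claim_ definition above) =====
theorem extract_pgn_text_spec : Claim_equal_extract_pgn_text := by
  intro text _
  show extract_pgn_text text = extract_pgn_text_alt text
  rw [pvStrEqIff, pvBridgeA, pvBridgeB, pvMain (text.toList.length) _ le_rfl]
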